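-- pv_equiv track=rewrite | github.com/seeum0507/CodingTest | 프로그래머스/0/120894. 영어가 싫어요/영어가 싫어요.py | solution
-- ===== SOURCE A (Python) =====
-- def solution(numbers):
--     mapping = {
--         "zero": "0", "one": "1", "two": "2", "three": "3", "four": "4",
--         "five": "5", "six": "6", "seven": "7", "eight": "8", "nine": "9"
--     }
--
--     result = []
--     temp = ""
--
--     for char in numbers:
--         temp += char
--         if temp in mapping:
--             result.append(mapping[temp])
--             temp = ""
--     return int(''.join(result))
-- ===== SOURCE B (Python) =====
-- def solution(numbers):
--     words = ["zero", "one", "two", "three", "four",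
--              "five", "six", "seven", "eight", "nine"]
--     digits = ""
--     rest = numbers
--     while rest:
--         for d, w in enumerate(words):
--             if rest.startswith(w):
--                 digits += str(d)
--                 rest = rest[len(w):]
--                 break
--         else:
--             break
--     return int(digits)
-- ===== Notes on version B (the rewrite author's own statement) =====
-- stated objective: alternative
-- what changed: Replaces A's per-character buffer accumulation with dict-membership tests and a final join+int by a word-at-a-time greedy parser that strips a spelled-out digit word from the front with startswith and appends its digit directly.
import Mathlib
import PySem

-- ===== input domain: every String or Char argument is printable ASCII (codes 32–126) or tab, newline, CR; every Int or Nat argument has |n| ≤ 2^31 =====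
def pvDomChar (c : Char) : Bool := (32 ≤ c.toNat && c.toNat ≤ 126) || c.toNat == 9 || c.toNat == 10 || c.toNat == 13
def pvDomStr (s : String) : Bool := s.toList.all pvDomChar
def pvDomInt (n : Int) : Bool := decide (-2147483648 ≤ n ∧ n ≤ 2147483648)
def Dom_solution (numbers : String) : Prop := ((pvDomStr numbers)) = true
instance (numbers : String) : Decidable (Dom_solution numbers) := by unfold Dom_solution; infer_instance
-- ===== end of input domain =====

-- B replaces A's per-character buffer + dict-membership scan by a word-at-a-time greedy
-- prefix parser over the ten spelled-out digit words (objective: alternative algorithm).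

-- ===== PORT A =====
def pvMapping : PySem.Dict (List Char) (List Char) :=
  PySem.Dict.ofList [("zero".toList, "0".toList), ("one".toList, "1".toList), ("two".toList, "2".toList),
    ("three".toList, "3".toList), ("four".toList, "4".toList), ("five".toList, "5".toList),
    ("six".toList, "6".toList), ("seven".toList, "7".toList), ("eight".toList, "8".toList),
    ("nine".toList, "9".toList)]

-- the for-loop: state (result, temp); `temp += char; if temp in mapping: result.append(mapping[temp]); temp = ""`
def aLoop : List Char → List (List Char) → List Char → List (List Char) × List Char
  | [], result, temp => (result, temp)
  | c :: cs, result, temp =>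
      match pvMapping.get? (temp ++ [c]) with
      | some v => aLoop cs (result ++ [v]) []
      | none => aLoop cs result (temp ++ [c])

-- int(''.join(result)); Python raises ValueError exactly where ofChars? is none (excluded by Pre_)
def solution (numbers : String) : Int :=
  (PySem.Int.ofChars? ((aLoop numbers.toList [] []).1.flatten)).getD 0

-- ===== PORT B =====
def pvWordsB : List (List Char) := ["zero".toList, "one".toList, "two".toList, "three".toList,
  "four".toList, "five".toList, "six".toList, "seven".toList, "eight".toList, "nine".toList]

-- the inner `for d, w in enumerate(words): if rest.startswith(w): … break / else: …`
def pvFindB (rest : List Char) : Option (Int × List Char) :=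
  (PySem.List.enumerate pvWordsB 0).find? (fun p => PySem.Chars.startswith rest p.2)

-- termination fact for the while-loop: a found word is a nonempty prefix of `rest`
theorem pvFindB_some {rest : List Char} {p : Int × List Char} (h : pvFindB rest = some p) :
    p.2 <+: rest ∧ 0 < p.2.length := by
  unfold pvFindB at h
  have hp := List.find?_some h
  have hm := List.mem_of_find?_eq_some h
  refine ⟨(PySem.Chars.startswith_iff _ _).mp hp, ?_⟩
  rw [show PySem.List.enumerate pvWordsB 0 =
    [(0, "zero".toList), (1, "one".toList), (2, "two".toList), (3, "three".toList),
     (4, "four".toList), (5, "five".toList), (6, "six".toList), (7, "seven".toList),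
     (8, "eight".toList), (9, "nine".toList)] from rfl] at hm
  simp only [List.mem_cons, List.not_mem_nil, or_false] at hm
  rcases hm with h | h | h | h | h | h | h | h | h | h <;> subst h <;> decide

-- the `while rest:` loop; digits accumulates `str(d)`, rest drops the matched word
def bLoop (rest digits : List Char) : List Char :=
  if rest = [] then digits
  else
    match hf : pvFindB rest with
    | some p => bLoop (rest.drop p.2.length) (digits ++ (PySem.Int.toStr p.1).toList)
    | none => digits
termination_by rest.length
decreasing_by
  have h := pvFindB_some hf
  have := h.1.length_le
  simp only [List.length_drop]
  omega

-- int(digits); raises exactly where ofChars? is none (excluded by Pre_)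
def solution_alt (numbers : String) : Int :=
  (PySem.Int.ofChars? (bLoop numbers.toList [])).getD 0

-- ===== PRECONDITION & SPEC =====
-- Pre_ holds exactly when some spelled-out digit word is a prefix of `numbers`: otherwise no word
-- is ever matched and the final int() call raises ValueError in Python A (and in B alike).
def Pre_solution (numbers : String) : Prop :=
  ∃ w ∈ ["zero".toList, "one".toList, "two".toList, "three".toList, "four".toList, "five".toList,
         "six".toList, "seven".toList, "eight".toList, "nine".toList], w <+: numbers.toList

instance (numbers : String) : Decidable (Pre_solution numbers) := by
  unfold Pre_solution; infer_instance

def pvWitness_solution : String := "seveneight"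

def Spec_solution (numbers : String) (out : Int) : Prop := out = solution_alt numbers

instance (numbers : String) (out : Int) : Decidable (Spec_solution numbers out) := by
  unfold Spec_solution; infer_instance

-- ===== CLAIM =====
def Claim_equal_solution : Prop :=
  ∀ (numbers : String), Dom_solution numbers → Pre_solution numbers →
    Spec_solution numbers (solution numbers)

-- ===== LEMMAS AND PROOFS =====

-- the digit characters emitted by greedily stripping spelled-out digit words from the front
def pvDigitsOf (cs : List Char) : List Char :=
  match hf : pvFindB cs with
  | some p => (PySem.Int.toStr p.1).toList ++ pvDigitsOf (cs.drop p.2.length)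
  | none => []
termination_by cs.length
decreasing_by
  have h := pvFindB_some hf
  have := h.1.length_le
  simp only [List.length_drop]
  omega

theorem pvDigitsOf_some {cs : List Char} {p : Int × List Char} (hf : pvFindB cs = some p) :
    pvDigitsOf cs = (PySem.Int.toStr p.1).toList ++ pvDigitsOf (cs.drop p.2.length) := by
  rw [pvDigitsOf.eq_def]
  split
  · rename_i p' hf'
    rw [hf'] at hf
    cases hf
    rfl
  · rename_i hf'
    rw [hf'] at hf
    cases hf

theorem pvDigitsOf_none {cs : List Char} (hf : pvFindB cs = none) : pvDigitsOf cs = [] := by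
  rw [pvDigitsOf.eq_def]
  split
  · rename_i p' hf'
    rw [hf'] at hf
    cases hf
  · rfl

theorem bLoop_eq (rest digits : List Char) : bLoop rest digits = digits ++ pvDigitsOf rest := by
  fun_induction bLoop rest digits with
  | case1 digits => rw [pvDigitsOf_none rfl, List.append_nil]
  | case2 rest digits hne p hf ih =>
      rw [ih, pvDigitsOf_some hf, ← List.append_assoc]
  | case3 rest digits hne hf => rw [pvDigitsOf_none hf, List.append_nil]

-- once the buffer can no longer complete to a dictionary key, A appends nothing more
theorem aLoop_none (cs : List Char) (res : List (List Char)) (temp : List Char)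
    (h : ∀ k : Nat, pvMapping.get? (temp ++ cs.take k) = none) :
    (aLoop cs res temp).1 = res := by
  induction cs generalizing temp with
  | nil => simp [aLoop]
  | cons c cs ih =>
      have h1 := h 1
      simp only [List.take_succ_cons, List.take_zero] at h1
      rw [aLoop, h1]
      exact ih (temp ++ [c]) fun k => by
        have := h (k + 1)
        simpa [List.take_succ_cons, List.append_assoc] using this

-- a dictionary hit means the buffer is one of the ten words
theorem mem_of_get?_some (w v : List Char) (h : pvMapping.get? w = some v) : w ∈ pvWordsB := by
  rw [PySem.Dict.get?_eq_some_iff_mem_items pvMapping w v (by decide)] at h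
  rw [show pvMapping.items =
    [("zero".toList, "0".toList), ("one".toList, "1".toList), ("two".toList, "2".toList),
     ("three".toList, "3".toList), ("four".toList, "4".toList), ("five".toList, "5".toList),
     ("six".toList, "6".toList), ("seven".toList, "7".toList), ("eight".toList, "8".toList),
     ("nine".toList, "9".toList)] from rfl] at h
  simp only [List.mem_cons, List.not_mem_nil, or_false, Prod.mk.injEq] at h
  rcases h with ⟨h, -⟩ | ⟨h, -⟩ | ⟨h, -⟩ | ⟨h, -⟩ | ⟨h, -⟩ | ⟨h, -⟩ | ⟨h, -⟩ | ⟨h, -⟩ | ⟨h, -⟩ | ⟨h, -⟩ <;>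
    subst h <;> decide

-- no word is a prefix ⇒ no buffer (a prefix of cs) is ever a key
theorem get?_take_none (cs : List Char) (hf : pvFindB cs = none) (k : Nat) :
    pvMapping.get? (cs.take k) = none := by
  cases hg : pvMapping.get? (cs.take k) with
  | none => rfl
  | some v =>
      exfalso
      have hmem := mem_of_get?_some _ _ hg
      have hpre : cs.take k <+: cs := List.take_prefix k cs
      unfold pvFindB at hf
      rw [List.find?_eq_none] at hf
      rw [show pvWordsB = ["zero".toList, "one".toList, "two".toList, "three".toList,
        "four".toList, "five".toList, "six".toList, "seven".toList, "eight".toList,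
        "nine".toList] from rfl] at hmem
      simp only [List.mem_cons, List.not_mem_nil, or_false] at hmem
      rcases hmem with h | h | h | h | h | h | h | h | h | h <;>
        [ exact absurd ((PySem.Chars.startswith_iff _ _).mpr (h ▸ hpre))
            (by simpa using hf (0, "zero".toList) (by decide));
          exact absurd ((PySem.Chars.startswith_iff _ _).mpr (h ▸ hpre))
            (by simpa using hf (1, "one".toList) (by decide));
          exact absurd ((PySem.Chars.startswith_iff _ _).mpr (h ▸ hpre))
            (by simpa using hf (2, "two".toList) (by decide));
          exact absurd ((PySem.Chars.startswith_iff _ _).mpr (h ▸ hpre))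
            (by simpa using hf (3, "three".toList) (by decide));
          exact absurd ((PySem.Chars.startswith_iff _ _).mpr (h ▸ hpre))
            (by simpa using hf (4, "four".toList) (by decide));
          exact absurd ((PySem.Chars.startswith_iff _ _).mpr (h ▸ hpre))
            (by simpa using hf (5, "five".toList) (by decide));
          exact absurd ((PySem.Chars.startswith_iff _ _).mpr (h ▸ hpre))
            (by simpa using hf (6, "six".toList) (by decide));
          exact absurd ((PySem.Chars.startswith_iff _ _).mpr (h ▸ hpre))
            (by simpa using hf (7, "seven".toList) (by decide));
          exact absurd ((PySem.Chars.startswith_iff _ _).mpr (h ▸ hpre))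
            (by simpa using hf (8, "eight".toList) (by decide));
          exact absurd ((PySem.Chars.startswith_iff _ _).mpr (h ▸ hpre))
            (by simpa using hf (9, "nine".toList) (by decide)) ]

-- consuming one found word in A's character scan
theorem aLoop_step (cs : List Char) (res : List (List Char)) (p : Int × List Char)
    (hf : pvFindB cs = some p) :
    aLoop cs res [] = aLoop (cs.drop p.2.length) (res ++ [(PySem.Int.toStr p.1).toList]) [] := by
  have hpre := (pvFindB_some hf).1
  have hm := List.mem_of_find?_eq_some (by unfold pvFindB at hf; exact hf)
  rw [show PySem.List.enumerate pvWordsB 0 =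
    [(0, "zero".toList), (1, "one".toList), (2, "two".toList), (3, "three".toList),
     (4, "four".toList), (5, "five".toList), (6, "six".toList), (7, "seven".toList),
     (8, "eight".toList), (9, "nine".toList)] from rfl] at hm
  simp only [List.mem_cons, List.not_mem_nil, or_false] at hm
  rcases hm with h | h | h | h | h | h | h | h | h | h <;> subst h <;>
    obtain ⟨rest, rfl⟩ := hpre <;> rfl

-- A's accumulated digit strings flatten to the greedy parse's digit characters
theorem aLoop_flatten (n : Nat) (cs : List Char) (res : List (List Char)) (hn : cs.length ≤ n) :
    (aLoop cs res []).1.flatten = res.flatten ++ pvDigitsOf cs := by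
  induction n generalizing cs res with
  | zero =>
      have : cs = [] := List.length_eq_zero_iff.mp (Nat.le_zero.mp hn)
      subst this
      rw [pvDigitsOf_none rfl]
      simp [aLoop]
  | succ n ih =>
      cases hf : pvFindB cs with
      | some p =>
          have h := pvFindB_some hf
          have hle := h.1.length_le
          rw [aLoop_step cs res p hf, pvDigitsOf_some hf,
            ih (cs.drop p.2.length) _ (by simp only [List.length_drop]; omega)]
          simp
      | none =>
          rw [pvDigitsOf_none hf]
          have := aLoop_none cs res [] (fun k => by simpa using get?_take_none cs hf k)
          simp [this]

theorem solution_eq_alt (numbers : String) : solution numbers = solution_alt numbers := by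
  unfold solution solution_alt
  rw [bLoop_eq, aLoop_flatten numbers.toList.length numbers.toList [] le_rfl]
  simp

-- ===== VERDICT =====
theorem solution_spec : Claim_equal_solution := by
  intro numbers _ _
  unfold Spec_solution
  exact solution_eq_alt numbers
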